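-- pv_equiv track=rewrite | github.com/daniel-reich/ubiquitous-fiesta | WixXhsdqcNHe3vTn3_17.py | how_bad
-- ===== SOURCE A (Python) =====
-- def how_bad(n):
--   x = sum(1 for x in str(bin(n)) if x == '1')
--   l = []
--   if x % 2 == 0:
--     l.append("Evil")
--   else:
--     l.append("Odious")
--   if all(x % n != 0 for n in range(2, x)) and (x > 1):
--     l.append("Pernicious")
--   return l
-- ===== SOURCE B (Python) =====
-- def _is_prime(x):
--     if x < 2:
--         return False
--     d = 2
--     while d * d <= x:
--         if x % d == 0:
--             return False
--         d += 1
--     return True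
--
-- def how_bad(n):
--     x = bin(n).count('1')
--     l = ["Evil"] if x % 2 == 0 else ["Odious"]
--     if _is_prime(x):
--         l.append("Pernicious")
--     return l
-- ===== Notes on version B (the rewrite author's own statement) =====
-- stated objective: idiomatic
-- what changed: Counts the '1' bits with str.count and tests whether the popcount is prime by square-root-bounded trial division in a small _is_prime helper, instead of a generator-sum character scan and an all(...) divisibility scan over the full range(2, x).
import Mathlib
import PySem

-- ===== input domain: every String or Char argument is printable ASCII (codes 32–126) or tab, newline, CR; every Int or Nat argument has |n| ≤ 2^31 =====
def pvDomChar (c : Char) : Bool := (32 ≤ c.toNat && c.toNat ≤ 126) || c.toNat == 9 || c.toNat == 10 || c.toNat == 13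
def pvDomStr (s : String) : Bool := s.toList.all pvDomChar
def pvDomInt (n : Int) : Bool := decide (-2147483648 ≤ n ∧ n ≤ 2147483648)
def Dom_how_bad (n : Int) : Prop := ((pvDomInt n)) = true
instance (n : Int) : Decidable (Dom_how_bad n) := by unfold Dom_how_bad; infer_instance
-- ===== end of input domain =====

-- B replaces the generator-sum popcount by str.count and the full range(2,x) divisibility
-- scan by a √-bounded trial-division is_prime helper (objective: idiomatic).

-- ===== PORT A =====
-- hand port of Python's bin(m) digit string for m > 0 (most significant bit first); exact
def natBits (m : Nat) : List Char :=
  if h : m = 0 then []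
  else natBits (m / 2) ++ [if m % 2 = 1 then '1' else '0']
decreasing_by exact Nat.div_lt_self (Nat.pos_of_ne_zero h) (by decide)

-- hand port of str(bin(n)): optional '-' sign, '0b' prefix, digits ('0' for n = 0); exact
def pyBin (n : Int) : List Char :=
  (if n < 0 then ['-'] else []) ++ ['0', 'b'] ++ (if n = 0 then ['0'] else natBits n.natAbs)

def how_bad (n : Int) : List String :=
  -- x = sum(1 for x in str(bin(n)) if x == '1')
  let x : Int := (pyBin n).foldl (fun acc c => if c = '1' then acc + 1 else acc) 0
  let l : List String := []
  let l := if PySem.Int.mod x 2 = 0 then l ++ ["Evil"] else l ++ ["Odious"]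
  if ((PySem.List.pyRange 2 x 1).all fun d => decide (PySem.Int.mod x d ≠ 0)) && decide (x > 1)
  then l ++ ["Pernicious"] else l

-- ===== PORT B =====
-- the while-loop of _is_prime, with enough fuel (the loop runs at most x.toNat times)
def isPrimeLoop (x d : Int) (fuel : Nat) : Bool :=
  match fuel with
  | 0 => true
  | fuel + 1 =>
    if d * d ≤ x then
      if PySem.Int.mod x d = 0 then false else isPrimeLoop x (d + 1) fuel
    else true

def is_prime (x : Int) : Bool :=
  if x < 2 then false else isPrimeLoop x 2 x.toNat

def how_bad_alt (n : Int) : List String :=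
  let x : Int := ((pyBin n).count '1' : Nat)   -- x = bin(n).count('1')
  let l : List String := if PySem.Int.mod x 2 = 0 then ["Evil"] else ["Odious"]
  if is_prime x then l ++ ["Pernicious"] else l

-- ===== PRECONDITION & SPEC =====
def Spec_how_bad (n : Int) (out : List String) : Prop := out = how_bad_alt n
instance (n : Int) (out : List String) : Decidable (Spec_how_bad n out) := by unfold Spec_how_bad; infer_instance

-- ===== CLAIM (what is proved, stated in full; the proofs are below) =====
def Claim_equal_how_bad : Prop := ∀ (n : Int), Dom_how_bad n → Spec_how_bad n (how_bad n)

-- ===== LEMMAS AND PROOFS =====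

theorem foldl_count_ones (l : List Char) (acc : Int) :
    l.foldl (fun acc c => if c = '1' then acc + 1 else acc) acc = acc + l.count '1' := by
  induction l generalizing acc with
  | nil => simp
  | cons c t ih =>
    simp only [List.foldl_cons, List.count_cons, ih]
    by_cases h : c = '1' <;> simp [h] <;> ring

theorem natBits_length_le (k : Nat) : ∀ m : Nat, m < 2 ^ k → (natBits m).length ≤ k := by
  induction k with
  | zero =>
    intro m hm
    interval_cases m
    rw [natBits]; simp
  | succ k ih =>
    intro m hm
    by_cases h : m = 0
    · subst h; rw [natBits]; simp
    · rw [natBits]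
      simp only [h, dite_false, List.length_append, List.length_singleton]
      have : m / 2 < 2 ^ k := by
        have : 2 ^ (k + 1) = 2 ^ k * 2 := by ring
        omega
      have := ih (m / 2) this
      omega

-- the two prime tests agree on every popcount a 2^31-bounded input can produce
theorem prime_tests_agree : ∀ k : Nat, k < 34 →
    (((PySem.List.pyRange 2 (k : Int) 1).all fun d => decide (PySem.Int.mod (k : Int) d ≠ 0))
      && decide ((k : Int) > 1)) = is_prime (k : Int) := by decide

theorem count_pyBin_le (n : Int) (h : n.natAbs ≤ 2 ^ 31) : (pyBin n).count '1' ≤ 33 := by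
  have hb : (natBits n.natAbs).length ≤ 32 :=
    natBits_length_le 32 n.natAbs (by omega)
  have hc : (natBits n.natAbs).count '1' ≤ 32 :=
    le_trans (List.count_le_length) hb
  unfold pyBin
  by_cases h0 : n = 0 <;> by_cases hneg : n < 0 <;>
    simp [h0, hneg] <;> omega

-- ===== VERDICT (by name: the statement is the Claim_ definition above) =====
theorem how_bad_spec : Claim_equal_how_bad := by
  intro n hd
  unfold Spec_how_bad how_bad how_bad_alt
  simp only [foldl_count_ones, Int.zero_add]
  have hdom : n.natAbs ≤ 2 ^ 31 := by
    have : pvDomInt n = true := hd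
    simp [pvDomInt] at this
    omega
  have hk : (pyBin n).count '1' < 34 := by
    have := count_pyBin_le n hdom; omega
  rw [prime_tests_agree _ hk]
  simp
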